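-- pv_equiv track=rewrite | github.com/eliottcassidy2000/math | 04-computation/flat_spectrum_maximization.py | difference_multiset
-- ===== SOURCE A (Python) =====
-- def difference_multiset(S, p):
--     """Compute the difference multiset {a-b mod p : a,b in S, a!=b}."""
--     diffs = {}
--     for a in S:
--         for b in S:
--             if a != b:
--                 d = (a - b) % p
--                 diffs[d] = diffs.get(d, 0) + 1
--     return diffs
-- ===== SOURCE B (Python) =====
-- def difference_multiset(S, p):
--     """Compute the difference multiset {a-b mod p : a,b in S, a!=b}.
--
--     Different algorithm: collapse S to its value->multiplicity counter, list the
--     contributions of each ordered pair of DISTINCT VALUES at once (weight =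
--     product of multiplicities), then aggregate the contribution list into the
--     result dict in one final pass.
--     """
--     cnt = {}
--     for a in S:
--         cnt[a] = cnt.get(a, 0) + 1
--     vals = list(cnt.items())
--     contrib = (((v - w) % p, cv * cw)
--                for v, cv in vals for w, cw in vals if v != w)
--     diffs = {}
--     for d, c in contrib:
--         diffs[d] = diffs.get(d, 0) + c
--     return diffs
-- ===== Notes on version B (the rewrite author's own statement) =====
-- stated objective: alternative
-- what changed: B replaces A's nested scan over the elements of S by three staged passes: it collapses S into a value->multiplicity counter, materialises one weighted contribution ((v-w)%p, cv*cw) per ordered pair of DISTINCT VALUES, and aggregates that contribution list into the result dict in a single final fold; pair work drops from O(n^2) to O(k^2) for k distinct values (equal when all values are distinct).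
import Mathlib
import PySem

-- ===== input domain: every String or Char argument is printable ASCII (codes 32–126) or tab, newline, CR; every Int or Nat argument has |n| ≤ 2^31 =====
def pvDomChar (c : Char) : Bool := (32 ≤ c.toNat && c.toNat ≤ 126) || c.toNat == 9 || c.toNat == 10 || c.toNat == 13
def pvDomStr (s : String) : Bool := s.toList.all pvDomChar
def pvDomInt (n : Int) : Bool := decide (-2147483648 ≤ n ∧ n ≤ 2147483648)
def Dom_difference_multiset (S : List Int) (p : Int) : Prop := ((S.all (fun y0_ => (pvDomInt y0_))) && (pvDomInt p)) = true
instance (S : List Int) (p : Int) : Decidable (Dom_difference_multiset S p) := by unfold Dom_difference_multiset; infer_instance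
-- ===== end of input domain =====

-- B collapses S into a value->multiplicity counter, materialises one weighted contribution
-- ((v-w) mod p, cv*cw) per ordered pair of DISTINCT values, and aggregates that list into the
-- result dict in one final pass; same return value, including dict insertion order.

-- ===== PORT A =====
def difference_multiset (S : List Int) (p : Int) : List (Int × Int) :=
  (S.foldl (fun diffs a =>
      S.foldl (fun diffs b =>
          if a ≠ b then
            diffs.insert (PySem.Int.mod (a - b) p)
              (diffs.getD (PySem.Int.mod (a - b) p) 0 + 1)
          else diffs)
        diffs)
    PySem.Dict.empty).items

-- ===== PORT B =====
def difference_multiset_alt (S : List Int) (p : Int) : List (Int × Int) :=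
  let cnt : PySem.Dict Int Int :=
    S.foldl (fun c a => c.insert a (c.getD a 0 + 1)) PySem.Dict.empty
  let vals := cnt.items
  let contrib := vals.flatMap (fun q =>
    vals.filterMap (fun r =>
      if q.1 ≠ r.1 then some (PySem.Int.mod (q.1 - r.1) p, q.2 * r.2) else none))
  (contrib.foldl (fun diffs c => diffs.insert c.1 (diffs.getD c.1 0 + c.2))
    PySem.Dict.empty).items

-- ===== PRECONDITION & SPEC =====
-- Pre_ excludes exactly the inputs where the Python A raises ZeroDivisionError:
-- p = 0 together with two distinct values in S (B raises there too).
def Pre_difference_multiset (S : List Int) (p : Int) : Prop :=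
  p ≠ 0 ∨ ∀ a ∈ S, ∀ b ∈ S, a = b
instance (S : List Int) (p : Int) : Decidable (Pre_difference_multiset S p) := by
  unfold Pre_difference_multiset; infer_instance
def pvWitness_difference_multiset : List Int × Int := ([0, 1, 2, 1], 5)
def Spec_difference_multiset (S : List Int) (p : Int) (out : List (Int × Int)) : Prop := out = difference_multiset_alt S p
instance (S : List Int) (p : Int) (out : List (Int × Int)) : Decidable (Spec_difference_multiset S p out) := by unfold Spec_difference_multiset; infer_instance

-- ===== CLAIM (what is proved, stated in full; the proofs are below) =====
def Claim_equal_difference_multiset : Prop := ∀ (S : List Int) (p : Int), Dom_difference_multiset S p → Pre_difference_multiset S p → Spec_difference_multiset S p (difference_multiset S p)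

-- ===== LEMMAS AND PROOFS =====

-- the flat contribution lists the two ports aggregate (proof-only views)
def pvLA (S : List Int) (p : Int) : List (Int × Int) :=
  S.flatMap (fun a => S.filterMap (fun b =>
    if a ≠ b then some (PySem.Int.mod (a - b) p, (1 : Int)) else none))

def pvLB (S : List Int) (p : Int) : List (Int × Int) :=
  (PySem.Dict.counter S).items.flatMap (fun q : Int × Int =>
    (PySem.Dict.counter S).items.filterMap (fun r : Int × Int =>
      if q.1 ≠ r.1 then some (PySem.Int.mod (q.1 - r.1) p, q.2 * r.2) else none))

-- total weight a flat contribution list assigns to key j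
def pvWsum (L : List (Int × Int)) (j : Int) : Int :=
  ((L.filter (fun q => q.1 == j)).map Prod.snd).sum

-- running value of a keyed accumulation fold
theorem pv_acc_getD {β : Type} (l : List β) (key : β → Int) (inc : β → Int)
    (d : PySem.Dict Int Int) (j : Int) :
    (l.foldl (fun d x => d.insert (key x) (d.getD (key x) 0 + inc x)) d).getD j 0
      = d.getD j 0 + ((l.filter (fun x => key x == j)).map inc).sum := by
  induction l generalizing d with
  | nil => simp
  | cons x l ih =>
    simp only [List.foldl_cons, ih, List.filter_cons]
    by_cases h : key x = j
    · simp [h]; ring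
    · simp [PySem.Dict.getD_insert, h, Ne.symm h]

theorem pv_set_add_of_mem {s : PySem.Set Int} {x : Int} (h : x ∈ s) :
    PySem.Set.add s x = s := by
  simp [PySem.Set.add, PySem.Set.contains, h]
theorem pv_set_add_of_not_mem {s : PySem.Set Int} {x : Int} (h : x ∉ s) :
    PySem.Set.add s x = s ++ [x] := by
  simp [PySem.Set.add, PySem.Set.contains, h]
theorem pv_set_update_prefix (l : List Int) : ∀ (s : PySem.Set Int),
    ∃ r, PySem.Set.update s l = s ++ r := by
  induction l with
  | nil => intro s; exact ⟨[], by simp [PySem.Set.update]⟩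
  | cons x l ih =>
    intro s
    show ∃ r, PySem.Set.update (PySem.Set.add s x) l = s ++ r
    by_cases hx : x ∈ s
    · rw [pv_set_add_of_mem hx]; exact ih s
    · rw [pv_set_add_of_not_mem hx]
      obtain ⟨r, hr⟩ := ih (s ++ [x])
      exact ⟨x :: r, by simpa using hr⟩

theorem pv_update_of_subset {m : List Int} {s : PySem.Set Int}
    (h : ∀ x ∈ m, x ∈ s) : PySem.Set.update s m = s := by
  induction m with
  | nil => rfl
  | cons x m ih =>
    rw [PySem.Set.update_cons, pv_set_add_of_mem (h x (by simp))]
    exact ih (fun y hy => h y (List.mem_cons_of_mem _ hy))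

-- dedup a flatMap's outer list under Set.update
theorem pv_update_flatMap_aux (F : Int → List Int) : ∀ (l seen : List Int) (s : PySem.Set Int),
    (∀ a ∈ seen, ∀ x ∈ F a, x ∈ s) →
    PySem.Set.update s (l.flatMap F)
      = PySem.Set.update s (((PySem.Set.update seen l).drop seen.length).flatMap F) := by
  intro l
  induction l with
  | nil => intro seen s _; simp [PySem.Set.update]
  | cons a l ih =>
    intro seen s hseen
    have hstep : PySem.Set.update s ((a :: l).flatMap F)
        = PySem.Set.update (PySem.Set.update s (F a)) (l.flatMap F) := by
      rw [List.flatMap_cons, PySem.Set.update_append]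
    have hseenstep : PySem.Set.update seen (a :: l)
        = PySem.Set.update (PySem.Set.add seen a) l := PySem.Set.update_cons ..
    by_cases ha : a ∈ seen
    · rw [hstep, hseenstep, pv_set_add_of_mem ha,
        pv_update_of_subset (hseen a ha)]
      exact ih seen s hseen
    · rw [hstep, hseenstep, pv_set_add_of_not_mem ha]
      obtain ⟨r, hr⟩ := pv_set_update_prefix l (seen ++ [a])
      have hdrop : (PySem.Set.update (seen ++ [a]) l).drop seen.length = a :: r := by
        rw [hr, List.append_assoc]
        simpa using List.drop_left seen (a :: r)
      rw [hdrop]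
      have hdrop2 : (PySem.Set.update (seen ++ [a]) l).drop (seen ++ [a]).length = r := by
        rw [hr]; simpa using List.drop_left (seen ++ [a]) r
      have := ih (seen ++ [a]) (PySem.Set.update s (F a)) (by
        intro b hb x hx
        rcases List.mem_append.mp hb with hb | hb
        · exact (PySem.Set.mem_update _ _ _).mpr (Or.inl (hseen b hb x hx))
        · have hb' : b = a := by simpa using hb
          exact (PySem.Set.mem_update _ _ _).mpr (Or.inr (hb' ▸ hx)))
      rw [hdrop2] at this
      calc PySem.Set.update (PySem.Set.update s (F a)) (l.flatMap F)
          = PySem.Set.update (PySem.Set.update s (F a)) (r.flatMap F) := this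
        _ = PySem.Set.update s ((a :: r).flatMap F) := by
            rw [List.flatMap_cons, PySem.Set.update_append]

theorem pv_update_flatMap_ofList (F : Int → List Int) (l : List Int) (s : PySem.Set Int) :
    PySem.Set.update s (l.flatMap F) = PySem.Set.update s ((PySem.Set.ofList l).flatMap F) := by
  have := pv_update_flatMap_aux F l [] s (by simp)
  simpa [PySem.Set.ofList_eq_foldl, PySem.Set.update] using this

theorem pv_update_flatMap_congr (F G : Int → List Int)
    (h : ∀ v (s : PySem.Set Int), PySem.Set.update s (F v) = PySem.Set.update s (G v)) :
    ∀ (l : List Int) (s : PySem.Set Int),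
      PySem.Set.update s (l.flatMap F) = PySem.Set.update s (l.flatMap G) := by
  intro l
  induction l with
  | nil => intro s; rfl
  | cons a l ih =>
    intro s
    rw [List.flatMap_cons, List.flatMap_cons, PySem.Set.update_append,
      PySem.Set.update_append, h a s, ih]

-- dedup a map's list under Set.update (first-occurrence argument)
theorem pv_update_map_aux (h : Int → Int) : ∀ (l seen : List Int) (s : PySem.Set Int),
    (∀ a ∈ seen, h a ∈ s) →
    PySem.Set.update s (l.map h)
      = PySem.Set.update s (((PySem.Set.update seen l).drop seen.length).map h) := by
  intro l
  induction l with
  | nil => intro seen s _; simp [PySem.Set.update]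
  | cons a l ih =>
    intro seen s hseen
    have hstep : PySem.Set.update s ((a :: l).map h)
        = PySem.Set.update (PySem.Set.add s (h a)) (l.map h) := rfl
    have hseenstep : PySem.Set.update seen (a :: l)
        = PySem.Set.update (PySem.Set.add seen a) l := rfl
    by_cases ha : a ∈ seen
    · rw [hstep, hseenstep, pv_set_add_of_mem ha,
        pv_set_add_of_mem (hseen a ha)]
      exact ih seen s hseen
    · rw [hstep, hseenstep, pv_set_add_of_not_mem ha]
      obtain ⟨r, hr⟩ := pv_set_update_prefix l (seen ++ [a])
      have hdrop : (PySem.Set.update (seen ++ [a]) l).drop seen.length = a :: r := by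
        rw [hr, List.append_assoc]
        simpa using List.drop_left seen (a :: r)
      rw [hdrop]
      have hdrop2 : (PySem.Set.update (seen ++ [a]) l).drop (seen ++ [a]).length = r := by
        rw [hr]; simpa using List.drop_left (seen ++ [a]) r
      have := ih (seen ++ [a]) (PySem.Set.add s (h a)) (by
        intro b hb
        rcases List.mem_append.mp hb with hb | hb
        · by_cases hm : h a ∈ s
          · rw [pv_set_add_of_mem hm]; exact hseen b hb
          · rw [pv_set_add_of_not_mem hm]; exact List.mem_append_left _ (hseen b hb)
        · have hb' : b = a := by simpa using hb
          rw [hb']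
          by_cases hm : h a ∈ s
          · rw [pv_set_add_of_mem hm]; exact hm
          · rw [pv_set_add_of_not_mem hm]; simp)
      rw [hdrop2] at this
      calc PySem.Set.update (PySem.Set.add s (h a)) (l.map h)
          = PySem.Set.update (PySem.Set.add s (h a)) (r.map h) := this
        _ = PySem.Set.update s ((a :: r).map h) := rfl

theorem pv_update_map_ofList (h : Int → Int) (l : List Int) (s : PySem.Set Int) :
    PySem.Set.update s (l.map h) = PySem.Set.update s ((PySem.Set.ofList l).map h) := by
  have := pv_update_map_aux h l [] s (by simp)
  simpa [PySem.Set.ofList_eq_foldl, PySem.Set.update] using this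

theorem pv_filter_add (q : Int → Bool) (s : PySem.Set Int) (x : Int) :
    (PySem.Set.add s x).filter q
      = if q x then PySem.Set.add (s.filter q) x else s.filter q := by
  by_cases hx : x ∈ s
  · rw [pv_set_add_of_mem hx]
    by_cases hq : q x
    · rw [if_pos hq, pv_set_add_of_mem (List.mem_filter.mpr ⟨hx, hq⟩)]
    · rw [if_neg hq]
  · rw [pv_set_add_of_not_mem hx, List.filter_append]
    by_cases hq : q x
    · rw [if_pos hq, pv_set_add_of_not_mem (fun hc => hx (List.mem_of_mem_filter hc))]
      simp [hq]
    · simp [hq]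

theorem pv_update_filter (q : Int → Bool) : ∀ (l : List Int) (s : PySem.Set Int),
    (PySem.Set.update s l).filter q = PySem.Set.update (s.filter q) (l.filter q) := by
  intro l
  induction l with
  | nil => intro s; rfl
  | cons x l ih =>
    intro s
    have h1 : PySem.Set.update s (x :: l) = PySem.Set.update (PySem.Set.add s x) l := rfl
    rw [h1, ih, pv_filter_add]
    by_cases hq : q x
    · simp only [List.filter_cons, hq, if_pos]
      rfl
    · simp [hq]

theorem pv_ofList_filter (q : Int → Bool) (l : List Int) :
    PySem.Set.ofList (l.filter q) = (PySem.Set.ofList l).filter q := by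
  rw [PySem.Set.ofList_eq_foldl, PySem.Set.ofList_eq_foldl]
  have := pv_update_filter q l []
  simpa [PySem.Set.update] using this.symm

-- weighted recount: a sum over the list equals the multiplicity-weighted sum over its distinct values
theorem pv_sum_weighted (l : List Int) (g : Int → Int) :
    (l.map g).sum = ((PySem.Set.ofList l).map (fun v => (l.count v : Int) * g v)).sum := by
  have h1 : ((l : Multiset Int).map g).sum
      = ∑ m ∈ (l : Multiset Int).toFinset, (l : Multiset Int).count m • g m :=
    Finset.sum_multiset_map_count _ _
  have h2 : ((l : Multiset Int).map g).sum = (l.map g).sum := by simp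
  have h3 : (PySem.Set.ofList l).toFinset = l.toFinset := by
    ext v; simp [PySem.Set.mem_ofList]
  have h4 : ((PySem.Set.ofList l).map (fun v => (l.count v : Int) * g v)).sum
      = (PySem.Set.ofList l).toFinset.sum (fun v => (l.count v : Int) * g v) :=
    (List.sum_toFinset _ (PySem.Set.nodup_ofList l)).symm
  rw [h4, h3, ← h2, h1]
  apply Finset.sum_congr rfl
  intro v _
  simp [Multiset.coe_count]

-- map Prod.fst over a guarded filterMap block
theorem pv_map_fst_block (c : Int → Prop) [DecidablePred c] (key wt : Int → Int) (l : List Int) :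
    (l.filterMap (fun b => if c b then some (key b, wt b) else none)).map Prod.fst
      = (l.filter (fun b => decide (c b))).map key := by
  induction l with
  | nil => rfl
  | cons b l ih =>
    by_cases hc : c b <;> simp [List.filterMap_cons, hc, ih]

-- pvWsum over append / flatMap / a guarded block
theorem pv_wsum_append (L1 L2 : List (Int × Int)) (j : Int) :
    pvWsum (L1 ++ L2) j = pvWsum L1 j + pvWsum L2 j := by
  simp [pvWsum, List.filter_append]

theorem pv_wsum_flatMap {α : Type} (f : α → List (Int × Int)) (l : List α) (j : Int) :
    pvWsum (l.flatMap f) j = (l.map (fun a => pvWsum (f a) j)).sum := by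
  induction l with
  | nil => simp [pvWsum]
  | cons a l ih => rw [List.flatMap_cons, pv_wsum_append, List.map_cons, List.sum_cons, ih]

theorem pv_wsum_block (c : Int → Prop) [DecidablePred c] (key wt : Int → Int) (l : List Int) (j : Int) :
    pvWsum (l.filterMap (fun b => if c b then some (key b, wt b) else none)) j
      = (l.map (fun b => if c b ∧ key b = j then wt b else 0)).sum := by
  induction l with
  | nil => rfl
  | cons b l ih =>
    by_cases hc : c b
    · by_cases hk : key b = j
      · simp [hc, hk, pvWsum, ← ih]
      · simp [hc, hk, pvWsum, ← ih]
    · simp [hc, ← ih]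

-- A's nested loop aggregates exactly the flat list pvLA
theorem pv_inner_flat (S : List Int) (p a : Int) : ∀ (d : PySem.Dict Int Int),
    S.foldl (fun diffs b =>
        if a ≠ b then
          diffs.insert (PySem.Int.mod (a - b) p)
            (diffs.getD (PySem.Int.mod (a - b) p) 0 + 1)
        else diffs) d
      = (S.filterMap (fun b =>
          if a ≠ b then some (PySem.Int.mod (a - b) p, (1 : Int)) else none)).foldl
          (fun diffs c => diffs.insert c.1 (diffs.getD c.1 0 + c.2)) d := by
  induction S with
  | nil => intro d; rfl
  | cons b S ih =>
    intro d
    rw [List.foldl_cons, List.filterMap_cons]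
    by_cases hab : a ≠ b
    · rw [if_pos hab, if_pos hab, List.foldl_cons]
      exact ih _
    · rw [if_neg hab, if_neg hab]
      exact ih d

theorem pv_A_flat (S : List Int) (p : Int) : ∀ (T : List Int) (d : PySem.Dict Int Int),
    T.foldl (fun diffs a =>
        S.foldl (fun diffs b =>
            if a ≠ b then
              diffs.insert (PySem.Int.mod (a - b) p)
                (diffs.getD (PySem.Int.mod (a - b) p) 0 + 1)
            else diffs) diffs) d
      = (T.flatMap (fun a => S.filterMap (fun b =>
          if a ≠ b then some (PySem.Int.mod (a - b) p, (1 : Int)) else none))).foldl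
          (fun diffs c => diffs.insert c.1 (diffs.getD c.1 0 + c.2)) d := by
  intro T
  induction T with
  | nil => intro d; rfl
  | cons a T ih =>
    intro d
    rw [List.foldl_cons, List.flatMap_cons, List.foldl_append, pv_inner_flat S p a d, ih]

-- the aggregation fold of a flat list, characterised: keys in first-occurrence order, weights summed
theorem pv_items_flat (L : List (Int × Int)) :
    (L.foldl (fun diffs c => diffs.insert c.1 (diffs.getD c.1 0 + c.2)) PySem.Dict.empty).items
      = (PySem.Set.ofList (L.map Prod.fst)).map (fun j => (j, pvWsum L j)) := by
  have hnd : ((PySem.Dict.empty : PySem.Dict Int Int)).keys.Nodup := by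
    simp [PySem.Dict.empty, PySem.Dict.keys]
  have hnd2 : (L.foldl (fun diffs (c : Int × Int) =>
      diffs.insert c.1 (diffs.getD c.1 0 + c.2)) (PySem.Dict.empty : PySem.Dict Int Int)).keys.Nodup :=
    PySem.Dict.nodup_keys_foldl_insert_key L Prod.fst _ PySem.Dict.empty hnd
  rw [PySem.Dict.items_eq_map_keys _ hnd2 0]
  have hkeys : (L.foldl (fun diffs (c : Int × Int) =>
      diffs.insert c.1 (diffs.getD c.1 0 + c.2)) (PySem.Dict.empty : PySem.Dict Int Int)).keys
      = PySem.Set.ofList (L.map Prod.fst) := by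
    have h1 : (L.foldl (fun diffs (c : Int × Int) =>
        diffs.insert c.1 (diffs.getD c.1 0 + c.2)) (PySem.Dict.empty : PySem.Dict Int Int)).keys
        = PySem.Set.update (PySem.Dict.empty : PySem.Dict Int Int).keys (L.map Prod.fst) :=
      PySem.Dict.keys_foldl_insert_key L Prod.fst _ PySem.Dict.empty
    rw [h1, show (PySem.Dict.empty : PySem.Dict Int Int).keys = [] from rfl,
      PySem.Set.update_nil_left]
  rw [hkeys]
  apply List.map_congr_left
  intro j _
  have h := pv_acc_getD L Prod.fst Prod.snd PySem.Dict.empty j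
  have h0 : (PySem.Dict.empty : PySem.Dict Int Int).getD j 0 = 0 := by simp
  rw [h, h0, zero_add]
  simp [pvWsum]

-- pvLB over the distinct values of S, unfolded
theorem pv_LB_eq (S : List Int) (p : Int) :
    pvLB S p = (PySem.Set.ofList S).flatMap (fun v =>
      (PySem.Set.ofList S).filterMap (fun w =>
        if v ≠ w then some (PySem.Int.mod (v - w) p, (S.count v : Int) * (S.count w : Int))
        else none)) := by
  unfold pvLB
  rw [PySem.Dict.items_counter, List.flatMap_map]
  simp only [List.filterMap_map, Function.comp_def]

-- (K) the two flat lists introduce keys in the same first-occurrence order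
theorem pv_keys_eq (S : List Int) (p : Int) :
    PySem.Set.ofList ((pvLA S p).map Prod.fst) = PySem.Set.ofList ((pvLB S p).map Prod.fst) := by
  rw [pv_LB_eq]
  unfold pvLA
  rw [List.map_flatMap, List.map_flatMap]
  have hA : ∀ a : Int,
      (S.filterMap (fun b =>
        if a ≠ b then some (PySem.Int.mod (a - b) p, (1 : Int)) else none)).map Prod.fst
      = (S.filter (fun b => decide (a ≠ b))).map (fun b => PySem.Int.mod (a - b) p) :=
    fun a => pv_map_fst_block (fun b => a ≠ b) (fun b => PySem.Int.mod (a - b) p) (fun _ => 1) S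
  have hB : ∀ v : Int,
      ((PySem.Set.ofList S).filterMap (fun w =>
        if v ≠ w then some (PySem.Int.mod (v - w) p, (S.count v : Int) * (S.count w : Int))
        else none)).map Prod.fst
      = ((PySem.Set.ofList S).filter (fun w => decide (v ≠ w))).map
          (fun w => PySem.Int.mod (v - w) p) :=
    fun v => pv_map_fst_block (fun w => v ≠ w) (fun w => PySem.Int.mod (v - w) p)
      (fun w => (S.count v : Int) * (S.count w : Int)) (PySem.Set.ofList S)
  simp only [hA, hB]
  rw [← PySem.Set.update_nil_left, ← PySem.Set.update_nil_left, pv_update_flatMap_ofList]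
  apply pv_update_flatMap_congr
  intro v s
  rw [← pv_ofList_filter, ← pv_update_map_ofList]

-- (V) the two flat lists assign every key the same total weight
theorem pv_wsum_eq (S : List Int) (p j : Int) :
    pvWsum (pvLA S p) j = pvWsum (pvLB S p) j := by
  rw [pv_LB_eq]
  unfold pvLA
  rw [pv_wsum_flatMap, pv_wsum_flatMap]
  have hA : ∀ a : Int,
      pvWsum (S.filterMap (fun b =>
        if a ≠ b then some (PySem.Int.mod (a - b) p, (1 : Int)) else none)) j
      = (S.map (fun b =>
          if a ≠ b ∧ PySem.Int.mod (a - b) p = j then (1 : Int) else 0)).sum :=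
    fun a => pv_wsum_block (fun b => a ≠ b) (fun b => PySem.Int.mod (a - b) p) (fun _ => 1) S j
  have hB : ∀ v : Int,
      pvWsum ((PySem.Set.ofList S).filterMap (fun w =>
        if v ≠ w then some (PySem.Int.mod (v - w) p, (S.count v : Int) * (S.count w : Int))
        else none)) j
      = ((PySem.Set.ofList S).map (fun w =>
          if v ≠ w ∧ PySem.Int.mod (v - w) p = j
          then (S.count v : Int) * (S.count w : Int) else 0)).sum :=
    fun v => pv_wsum_block (fun w => v ≠ w) (fun w => PySem.Int.mod (v - w) p)
      (fun w => (S.count v : Int) * (S.count w : Int)) (PySem.Set.ofList S) j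
  simp only [hA, hB]
  rw [pv_sum_weighted S (fun a => (S.map (fun b =>
    if a ≠ b ∧ PySem.Int.mod (a - b) p = j then (1 : Int) else 0)).sum)]
  apply congrArg List.sum
  apply List.map_congr_left
  intro v _
  rw [pv_sum_weighted S (fun b =>
    if v ≠ b ∧ PySem.Int.mod (v - b) p = j then (1 : Int) else 0)]
  rw [← List.sum_map_mul_left]
  apply congrArg List.sum
  apply List.map_congr_left
  intro w _
  by_cases hc : v ≠ w ∧ PySem.Int.mod (v - w) p = j
  · simp [hc]
  · simp [hc]

theorem pv_ports_eq (S : List Int) (p : Int) :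
    difference_multiset S p = difference_multiset_alt S p := by
  have hA : difference_multiset S p
      = ((pvLA S p).foldl (fun diffs c =>
          diffs.insert c.1 (diffs.getD c.1 0 + c.2)) PySem.Dict.empty).items := by
    unfold difference_multiset pvLA
    rw [pv_A_flat S p S PySem.Dict.empty]
  have hB : difference_multiset_alt S p
      = ((pvLB S p).foldl (fun diffs c =>
          diffs.insert c.1 (diffs.getD c.1 0 + c.2)) PySem.Dict.empty).items := by
    unfold difference_multiset_alt pvLB
    simp only [PySem.Dict.foldl_insert_getD_add_one_eq_counter]
  rw [hA, hB, pv_items_flat, pv_items_flat, pv_keys_eq S p]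
  exact List.map_congr_left (fun j _ => by rw [pv_wsum_eq S p j])

-- ===== VERDICT (by name: the statement is the Claim_ definition above) =====
theorem difference_multiset_spec : Claim_equal_difference_multiset := by
  intro S p _ _
  unfold Spec_difference_multiset
  exact pv_ports_eq S p
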